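-- pv_equiv track=rewrite | github.com/TanFangZhou/CRC_Phython | crc/crc.py | lst_xor
-- ===== SOURCE A (Python) =====
-- def lst_xor(list0):
--     len0 = len(list0)
--     for i in range(len0):
--         list1 = list0[i]
--         len1 = len(list1)
--         j = 0
--         while j < len1:
--             entry = list1[j]
--             cnt = list1.count(entry) // 2
--             if cnt != 0:
--                 cnt *= 2
--                 len1 -= cnt
--                 for k in range(cnt):
--                     list1.remove(entry)
--             else:
--                 j += 1
--     return list0
-- ===== SOURCE B (Python) =====
-- def lst_xor(list0):
--     for i, row in enumerate(list0):
--         cnt = {}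
--         for x in row:
--             cnt[x] = cnt.get(x, 0) + 1
--         odd = [x for x in row if cnt[x] % 2 == 1]
--         seen = set()
--         res = []
--         for x in reversed(odd):
--             if x not in seen:
--                 seen.add(x)
--                 res.append(x)
--         res.reverse()
--         list0[i] = res
--     return list0
-- ===== Notes on version B (the rewrite author's own statement) =====
-- stated objective: faster
-- what changed: Replaces A's repeated count()/remove() scans inside a while loop by a single counting pass per sublist (dict of parities) followed by a reversed seen-set dedup that keeps each odd-count element at its last occurrence.
import Mathlib
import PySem

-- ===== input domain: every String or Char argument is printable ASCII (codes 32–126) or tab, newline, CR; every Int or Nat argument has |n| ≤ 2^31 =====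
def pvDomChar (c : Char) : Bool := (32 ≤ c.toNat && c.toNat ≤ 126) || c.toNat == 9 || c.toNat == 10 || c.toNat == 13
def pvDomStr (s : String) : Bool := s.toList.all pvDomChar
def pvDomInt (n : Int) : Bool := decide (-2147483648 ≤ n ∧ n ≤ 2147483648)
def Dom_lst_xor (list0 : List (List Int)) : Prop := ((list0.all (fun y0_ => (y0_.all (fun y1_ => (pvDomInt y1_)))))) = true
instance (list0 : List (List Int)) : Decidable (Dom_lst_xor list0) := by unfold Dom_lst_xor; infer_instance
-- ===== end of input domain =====

-- B replaces A's quadratic count()/remove() while-loop by one counting pass (dict of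
-- parities) plus a reversed seen-set dedup per sublist. A mutates the inner lists in
-- place and returns list0; B rebinds list0[i] instead — equivalence here is about the
-- return value.

-- ===== PORT A =====

-- 'for k in range(cnt): list1.remove(entry)': list.remove deletes the first occurrence
-- (= List.erase); it can never raise here since A removes at most count(entry) copies.
def removeLoop (x : Int) : List Int → Nat → List Int
  | l, 0 => l
  | l, k + 1 => removeLoop x (l.erase x) k

-- termination facts for the while loop (cited by innerA's decreasing_by)
theorem removeLoop_length_le (x : Int) : ∀ (k : Nat) (l : List Int),
    (removeLoop x l k).length ≤ l.length := by
  intro k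
  induction k with
  | zero => intro l; simp [removeLoop]
  | succ k ih =>
      intro l
      refine le_trans (ih (l.erase x)) ?_
      simp [List.length_erase]
      split <;> omega

theorem removeLoop_length_lt (x : Int) (l : List Int) (k : Nat)
    (hx : x ∈ l) (hk : 0 < k) : (removeLoop x l k).length < l.length := by
  match k, hk with
  | k + 1, _ =>
    have h1 : (removeLoop x (l.erase x) k).length ≤ (l.erase x).length :=
      removeLoop_length_le x k (l.erase x)
    have h2 : (l.erase x).length = l.length - 1 := List.length_erase_of_mem hx
    have h3 : 0 < l.length := List.length_pos_of_mem hx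
    simp only [removeLoop]
    omega

-- the inner 'while j < len1' loop of A (len1 is kept equal to len(list1), ported as l.length)
def innerA (l : List Int) (j : Nat) : List Int :=
  if h : j < l.length then
    -- entry = list1[j]; cnt = list1.count(entry) // 2
    if hc : l.count l[j] / 2 ≠ 0 then
      innerA (removeLoop l[j] l (l.count l[j] / 2 * 2)) j
    else
      innerA l (j + 1)
  else l
termination_by l.length - j
decreasing_by
  · have hx : l[j] ∈ l := List.getElem_mem h
    have hlt := removeLoop_length_lt l[j] l (l.count l[j] / 2 * 2) hx (by omega)
    omega
  · omega

def lst_xor (list0 : List (List Int)) : List (List Int) :=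
  list0.map (fun list1 => innerA list1 0)

-- ===== PORT B =====

-- one sublist of B: counting pass, parity filter, reversed seen-set dedup
def rowAlt (row : List Int) : List Int :=
  let cnt := row.foldl (fun d x => d.insert x (d.getD x 0 + 1)) PySem.Dict.empty
  let odd := row.filter (fun x => PySem.Int.mod (cnt.getD x 0) 2 == 1)
  let p := odd.reverse.foldl
    (fun (p : PySem.Set Int × List Int) x =>
      if PySem.Set.contains p.1 x then p else (PySem.Set.add p.1 x, p.2 ++ [x]))
    (PySem.Set.empty, [])
  p.2.reverse

def lst_xor_alt (list0 : List (List Int)) : List (List Int) :=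
  list0.map rowAlt

-- ===== PRECONDITION & SPEC =====
def Spec_lst_xor (list0 : List (List Int)) (out : List (List Int)) : Prop := out = lst_xor_alt list0
instance (list0 : List (List Int)) (out : List (List Int)) : Decidable (Spec_lst_xor list0 out) := by unfold Spec_lst_xor; infer_instance

-- ===== CLAIM (what is proved, stated in full; the proofs are below) =====
def Claim_equal_lst_xor : Prop := ∀ (list0 : List (List Int)), Dom_lst_xor list0 → Spec_lst_xor list0 (lst_xor list0)

-- ===== LEMMAS AND PROOFS =====

-- the common reference function: cancel pairs left to right
def erasePairs : List Int → List Int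
  | [] => []
  | x :: xs =>
      if h : x ∈ xs then erasePairs (xs.erase x)
      else x :: erasePairs xs

termination_by l => l.length
decreasing_by
  · have h1 := List.length_erase_of_mem h
    have h2 := List.length_pos_of_mem h
    simp only [List.length_cons]
    omega
  · simp only [List.length_cons]
    omega

theorem erasePairs_nil : erasePairs [] = [] := by simp [erasePairs]

theorem erasePairs_cons_of_mem {x : Int} {xs : List Int} (h : x ∈ xs) :
    erasePairs (x :: xs) = erasePairs (xs.erase x) := by
  rw [erasePairs]; simp [h]

theorem erasePairs_cons_of_not_mem {x : Int} {xs : List Int} (h : x ∉ xs) :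
    erasePairs (x :: xs) = x :: erasePairs xs := by
  rw [erasePairs]; simp [h]

-- removing two copies of x does not change erasePairs
theorem erasePairs_erase2 (x : Int) :
    ∀ (n : Nat) (s : List Int), s.length ≤ n → 2 ≤ s.count x →
      erasePairs ((s.erase x).erase x) = erasePairs s := by
  intro n
  induction n with
  | zero =>
      intro s hlen hc
      interval_cases h : s.length
      · simp_all
  | succ n ih =>
      intro s hlen hc
      match s with
      | [] => simp at hc
      | y :: ys =>
        by_cases hxy : y = x
        · subst hxy
          have hmem : y ∈ ys := by
            have h1 : List.count y (y :: ys) = List.count y ys + 1 :=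
              List.count_cons_self
            have h2 : 2 ≤ List.count y (y :: ys) := hc
            exact List.count_pos_iff.mp (by omega)
          rw [List.erase_cons_head]
          rw [erasePairs_cons_of_mem hmem]
        · have herase : (y :: ys).erase x = y :: ys.erase x :=
            List.erase_cons_tail (by simp [hxy])
          have herase2 : (y :: ys.erase x).erase x = y :: (ys.erase x).erase x :=
            List.erase_cons_tail (by simp [hxy])
          rw [herase, herase2]
          have hcys : 2 ≤ ys.count x := by
            have := hc
            rw [List.count_cons_of_ne (by exact fun hh => hxy hh)] at this
            exact this
          have hymem : y ∈ (ys.erase x).erase x ↔ y ∈ ys := by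
            constructor
            · intro h; exact List.mem_of_mem_erase (List.mem_of_mem_erase h)
            · intro h
              have c1 : ((ys.erase x).erase x).count y = ys.count y := by
                rw [List.count_erase_of_ne hxy, List.count_erase_of_ne hxy]
              have : 0 < ys.count y := List.count_pos_iff.mpr h
              exact List.count_pos_iff.mp (by omega)
          by_cases hy : y ∈ ys
          · rw [erasePairs_cons_of_mem (hymem.mpr hy), erasePairs_cons_of_mem hy]
            rw [List.erase_comm (l := ys.erase x), List.erase_comm (l := ys)]
            apply ih
            · have := List.length_erase_of_mem hy
              simp at hlen
              omega
            · rw [List.count_erase_of_ne (fun hh => hxy hh.symm)]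
              exact hcys
          · rw [erasePairs_cons_of_not_mem (fun hh => hy (hymem.mp hh)),
                erasePairs_cons_of_not_mem hy]
            congr 1
            apply ih
            · simp at hlen; omega
            · exact hcys

theorem erasePairs_removeLoop (x : Int) :
    ∀ (k : Nat) (s : List Int), 2 * k ≤ s.count x →
      erasePairs (removeLoop x s (2 * k)) = erasePairs s := by
  intro k
  induction k with
  | zero => intro s _; simp [removeLoop]
  | succ k ih =>
      intro s hc
      have h2 : 2 * (k + 1) = (2 * k + 1) + 1 := by omega
      rw [h2]
      show erasePairs (removeLoop x ((s.erase x).erase x) (2 * k)) = erasePairs s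
      have hcnt : ((s.erase x).erase x).count x = s.count x - 2 := by
        rw [List.count_erase_self, List.count_erase_self]
        omega
      rw [ih ((s.erase x).erase x) (by omega)]
      exact erasePairs_erase2 x s.length s (le_refl _) (by omega)

theorem removeLoop_count_ne (x y : Int) (hxy : y ≠ x) :
    ∀ (k : Nat) (s : List Int), (removeLoop x s k).count y = s.count y := by
  intro k
  induction k with
  | zero => intro s; simp [removeLoop]
  | succ k ih =>
      intro s
      show (removeLoop x (s.erase x) k).count y = s.count y
      rw [ih, List.count_erase_of_ne hxy]

theorem removeLoop_append (x : Int) (p : List Int) (hp : x ∉ p) :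
    ∀ (k : Nat) (s : List Int), removeLoop x (p ++ s) k = p ++ removeLoop x s k := by
  intro k
  induction k with
  | zero => intro s; simp [removeLoop]
  | succ k ih =>
      intro s
      show removeLoop x ((p ++ s).erase x) k = p ++ removeLoop x (s.erase x) k
      rw [List.erase_append_right _ hp, ih]

-- the invariant of A's while loop: every element left of j occurs exactly once in l
theorem innerA_eq (l : List Int) (j : Nat) :
    (∀ x ∈ l.take j, l.count x = 1) →
    innerA l j = l.take j ++ erasePairs (l.drop j) := by
  induction l, j using innerA.induct with
  | case1 l j h hc ih =>
      intro hinv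
      set entry := l[j] with hE
      set cnt := l.count entry / 2 with hC
      have hc2 : 2 ≤ l.count entry := by omega
      have hpre : entry ∉ l.take j := by
        intro hmem
        have := hinv entry hmem
        omega
      rw [innerA, dif_pos h, dif_pos hc]
      have hsplit : l = l.take j ++ l.drop j := (List.take_append_drop j l).symm
      have hrl : removeLoop entry l (cnt * 2)
          = l.take j ++ removeLoop entry (l.drop j) (cnt * 2) := by
        conv_lhs => rw [hsplit]
        exact removeLoop_append entry (l.take j) hpre (cnt * 2) (l.drop j)
      have hlen_take : (l.take j).length = j := by
        rw [List.length_take]; omega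
      have htake : (removeLoop entry l (cnt * 2)).take j = l.take j := by
        rw [hrl]; exact List.take_left' hlen_take
      have hdrop : (removeLoop entry l (cnt * 2)).drop j
          = removeLoop entry (l.drop j) (cnt * 2) := by
        rw [hrl]; exact List.drop_left' hlen_take
      have hcount_drop : (l.drop j).count entry = l.count entry := by
        conv_rhs => rw [hsplit]
        rw [List.count_append]
        have : (l.take j).count entry = 0 := List.count_eq_zero.mpr hpre
        omega
      have hinv' : ∀ x ∈ (removeLoop entry l (cnt * 2)).take j,
          (removeLoop entry l (cnt * 2)).count x = 1 := by
        intro x hx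
        rw [htake] at hx
        have hne : x ≠ entry := fun hh => hpre (hh ▸ hx)
        rw [removeLoop_count_ne entry x hne]
        exact hinv x hx
      rw [ih hinv', htake, hdrop]
      congr 1
      have hmul : cnt * 2 = 2 * cnt := by omega
      rw [hmul]
      apply erasePairs_removeLoop
      rw [hcount_drop]
      omega
  | case2 l j h hc ih =>
      intro hinv
      set entry := l[j] with hE
      have hc1 : l.count entry = 1 := by
        have hpos : 0 < l.count entry :=
          List.count_pos_iff.mpr (List.getElem_mem h)
        omega
      have hdropj : l.drop j = entry :: l.drop (j + 1) :=
        (List.getElem_cons_drop h).symm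
      have htakej : l.take (j + 1) = l.take j ++ [entry] := by
        rw [List.take_add_one]
        simp [List.getElem?_eq_getElem h, hE]
      have hnotin : entry ∉ l.drop (j + 1) := by
        intro hmem
        have hdcount : (l.drop j).count entry ≤ l.count entry := by
          conv_rhs => rw [← List.take_append_drop j l]
          rw [List.count_append]; omega
        rw [hdropj, List.count_cons_self] at hdcount
        have : 0 < (l.drop (j + 1)).count entry := List.count_pos_iff.mpr hmem
        omega
      rw [innerA, dif_pos h, dif_neg hc]
      have hinv' : ∀ x ∈ l.take (j + 1), l.count x = 1 := by
        intro x hx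
        rw [htakej] at hx
        rcases List.mem_append.mp hx with hx | hx
        · exact hinv x hx
        · simp at hx; subst hx; exact hc1
      rw [ih hinv', htakej, hdropj, erasePairs_cons_of_not_mem hnotin]
      simp
  | case3 l j h =>
      intro _
      have hle : l.length ≤ j := by omega
      rw [innerA, dif_neg h]
      rw [List.take_of_length_le hle, List.drop_eq_nil_of_le hle, erasePairs_nil]
      simp

theorem innerA_eq_erasePairs (l : List Int) : innerA l 0 = erasePairs l := by
  have := innerA_eq l 0 (by intro x hx; simp at hx)
  simpa using this

-- ===== B side =====

-- Mathlib's List.dedup keeps LAST occurrences; structural facts about it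
theorem dedup_append_singleton (x : Int) :
    ∀ (m : List Int), (m ++ [x]).dedup = (m.filter (fun y => !(y == x))).dedup ++ [x] := by
  intro m
  induction m with
  | nil => simp
  | cons a m ih =>
      by_cases hax : a = x
      · subst hax
        have hmem : a ∈ m ++ [a] := by simp
        rw [List.cons_append, List.dedup_cons_of_mem hmem, ih]
        simp
      · have hstep : List.filter (fun y => !(y == x)) (a :: m)
            = a :: List.filter (fun y => !(y == x)) m := by
          simp [hax]
        by_cases ham : a ∈ m
        · have hmem : a ∈ m ++ [x] := by simp [ham]
          rw [List.cons_append, List.dedup_cons_of_mem hmem, ih]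
          have : a ∈ m.filter (fun y => !(y == x)) := by
            simp [List.mem_filter, ham, hax]
          rw [hstep, List.dedup_cons_of_mem this]
        · have hmem : a ∉ m ++ [x] := by simp [ham, hax]
          rw [List.cons_append, List.dedup_cons_of_notMem hmem, ih]
          have : a ∉ m.filter (fun y => !(y == x)) := by
            simp [List.mem_filter, ham]
          rw [hstep, List.dedup_cons_of_notMem this]
          simp

theorem dedup_middle (x : Int) :
    ∀ (a b : List Int), x ∈ b → (a ++ x :: b).dedup = (a ++ b).dedup := by
  intro a
  induction a with
  | nil => intro b hb; simpa using List.dedup_cons_of_mem hb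
  | cons h t ih =>
      intro b hb
      by_cases hm : h ∈ t ++ b
      · have hm' : h ∈ t ++ x :: b := by
          rcases List.mem_append.mp hm with h1 | h1
          · exact List.mem_append.mpr (Or.inl h1)
          · exact List.mem_append.mpr (Or.inr (List.mem_cons_of_mem _ h1))
        rw [List.cons_append, List.dedup_cons_of_mem hm', List.cons_append,
            List.dedup_cons_of_mem hm, ih b hb]
      · have hm' : h ∉ t ++ x :: b := by
          intro hc
          rcases List.mem_append.mp hc with h1 | h1
          · exact hm (List.mem_append.mpr (Or.inl h1))
          · rcases List.mem_cons.mp h1 with h2 | h2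
            · subst h2; exact hm (List.mem_append.mpr (Or.inr hb))
            · exact hm (List.mem_append.mpr (Or.inr h2))
        rw [List.cons_append, List.dedup_cons_of_notMem hm', List.cons_append,
            List.dedup_cons_of_notMem hm, ih b hb]

-- erasePairs is: keep the elements of odd count, each at its last occurrence
theorem erasePairs_eq_dedup_filter :
    ∀ (n : Nat) (l : List Int), l.length ≤ n →
      erasePairs l = (l.filter (fun x => l.count x % 2 == 1)).dedup := by
  intro n
  induction n with
  | zero =>
      intro l hlen
      have : l = [] := List.eq_nil_of_length_eq_zero (by omega)
      subst this
      simp [erasePairs_nil]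
  | succ n ih =>
      intro l hlen
      match l with
      | [] => simp [erasePairs_nil]
      | x :: xs =>
        by_cases hx : x ∈ xs
        · rw [erasePairs_cons_of_mem hx]
          obtain ⟨u, v, hxu, hsplit, herase⟩ := List.exists_erase_eq hx
          rw [herase]
          have hlenuv : (u ++ v).length ≤ n := by
            have h1 : xs.length ≤ n := by simpa using hlen
            have h2 : xs.length = u.length + v.length + 1 := by
              rw [hsplit]; simp; omega
            simp
            omega
          rw [ih (u ++ v) hlenuv]
          have hcu : u.count x = 0 := List.count_eq_zero.mpr hxu
          have hcxl : (x :: xs).count x = v.count x + 2 := by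
            rw [hsplit, List.count_cons_self, List.count_append,
                List.count_cons_self]
            omega
          have hcuv : (u ++ v).count x = v.count x := by
            rw [List.count_append]; omega
          have hne : ∀ y, y ≠ x → (x :: xs).count y = (u ++ v).count y := by
            intro y hy
            rw [hsplit, List.count_cons_of_ne hy.symm, List.count_append,
                List.count_append, List.count_cons_of_ne hy.symm]
          have hpeq : ∀ y ∈ u ++ v,
              ((u ++ v).count y % 2 == 1) = ((x :: xs).count y % 2 == 1) := by
            intro y _
            by_cases hy : y = x
            · subst hy
              rw [hcxl, hcuv, Nat.add_mod_right]
            · rw [hne y hy]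
          rw [List.filter_congr hpeq]
          -- both sides now use the predicate counting in (x :: xs)
          have hfsplit : (x :: xs).filter (fun y => (x :: xs).count y % 2 == 1)
              = (if ((x :: xs).count x % 2 == 1) then [x] else [])
                ++ u.filter (fun y => (x :: xs).count y % 2 == 1)
                ++ ((x :: v).filter (fun y => (x :: xs).count y % 2 == 1)) := by
            rw [hsplit]
            rw [List.filter_cons, List.filter_append]
            split <;> simp
          by_cases hodd : v.count x % 2 = 1
          · have hpx : ((x :: xs).count x % 2 == 1) = true := by
              rw [hcxl, Nat.add_mod_right, hodd]
              decide
            have hxv : x ∈ v := by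
              have : 0 < v.count x := by omega
              exact List.count_pos_iff.mp this
            have hfv : List.filter (fun y => (x :: xs).count y % 2 == 1) (x :: v)
                = x :: List.filter (fun y => (x :: xs).count y % 2 == 1) v := by
              simp only [List.filter_cons, hpx]
              simp
            rw [hfsplit, hpx, if_pos rfl, hfv, List.filter_append]
            have hxfv : x ∈ v.filter (fun y => (x :: xs).count y % 2 == 1) :=
              List.mem_filter.mpr ⟨hxv, by simpa using hpx⟩
            have hshape : [x] ++ List.filter (fun y => (x :: xs).count y % 2 == 1) u
                ++ x :: List.filter (fun y => (x :: xs).count y % 2 == 1) v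
                = x :: (List.filter (fun y => (x :: xs).count y % 2 == 1) u
                    ++ x :: List.filter (fun y => (x :: xs).count y % 2 == 1) v) := by
              simp
            rw [hshape, List.dedup_cons_of_mem (by simp), dedup_middle x _ _ hxfv]
          · have hpx : ((x :: xs).count x % 2 == 1) = false := by
              have h0 : v.count x % 2 = 0 := by
                have := Nat.mod_two_eq_zero_or_one (v.count x)
                omega
              rw [hcxl, Nat.add_mod_right, h0]
              decide
            have hfv : List.filter (fun y => (x :: xs).count y % 2 == 1) (x :: v)
                = List.filter (fun y => (x :: xs).count y % 2 == 1) v := by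
              simp only [List.filter_cons, hpx]
              simp
            rw [hfsplit, hpx, if_neg (by simp), hfv, List.filter_append]
            simp
        · rw [erasePairs_cons_of_not_mem hx, ih xs (by simpa using hlen)]
          have hpx : ((x :: xs).count x % 2 == 1) = true := by
            have h1 : xs.count x = 0 := List.count_eq_zero.mpr hx
            rw [List.count_cons_self, h1]
            decide
          have hstep : List.filter (fun y => (x :: xs).count y % 2 == 1) (x :: xs)
              = x :: List.filter (fun y => (x :: xs).count y % 2 == 1) xs := by
            simp only [List.filter_cons, hpx]
            simp
          rw [hstep]
          have hcong : ∀ y ∈ xs,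
              ((x :: xs).count y % 2 == 1) = (xs.count y % 2 == 1) := by
            intro y hy
            have hyx : y ≠ x := fun hh => hx (hh ▸ hy)
            rw [List.count_cons_of_ne hyx.symm]
          rw [List.filter_congr hcong]
          have hnm : x ∉ xs.filter (fun y => xs.count y % 2 == 1) := by
            intro hc
            exact hx (List.mem_filter.mp hc).1
          rw [List.dedup_cons_of_notMem hnm]

theorem erasePairs_eq_dedup (l : List Int) :
    erasePairs l = (l.filter (fun x => l.count x % 2 == 1)).dedup :=
  erasePairs_eq_dedup_filter l.length l (le_refl _)

theorem contains_add (s : PySem.Set Int) (x y : Int) :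
    PySem.Set.contains (PySem.Set.add s x) y = (PySem.Set.contains s y || y == x) := by
  by_cases hx : x ∈ s <;> by_cases hy : y ∈ s <;> by_cases hyx : y = x <;>
    simp_all [PySem.Set.add, PySem.Set.contains]

-- the seen-set loop of B, named
def kf : PySem.Set Int → List Int → List Int
  | _, [] => []
  | s, x :: t =>
      if PySem.Set.contains s x then kf s t else x :: kf (PySem.Set.add s x) t

theorem kf_foldl :
    ∀ (w : List Int) (s₀ : PySem.Set Int) (acc : List Int),
      (w.foldl (fun (p : PySem.Set Int × List Int) x =>
        if PySem.Set.contains p.1 x then p else (PySem.Set.add p.1 x, p.2 ++ [x]))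
        (s₀, acc)).2 = acc ++ kf s₀ w := by
  intro w
  induction w with
  | nil => intro s₀ acc; simp [kf]
  | cons x t ih =>
      intro s₀ acc
      by_cases hc : PySem.Set.contains s₀ x
      · simp only [List.foldl_cons, if_pos hc]
        rw [ih, kf, if_pos hc]
      · simp only [List.foldl_cons, if_neg hc]
        rw [ih, kf, if_neg hc]
        simp

theorem kf_reverse :
    ∀ (w : List Int) (s : PySem.Set Int),
      (kf s w).reverse
        = ((w.filter (fun y => !PySem.Set.contains s y)).reverse).dedup := by
  intro w
  induction w with
  | nil => intro s; simp [kf]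
  | cons x t ih =>
      intro s
      by_cases hc : PySem.Set.contains s x
      · rw [kf, if_pos hc, ih s,
            List.filter_cons_of_neg (by simp [PySem.Set.contains] at hc ⊢; exact hc)]
      · rw [kf, if_neg hc]
        rw [List.filter_cons_of_pos (by simp [PySem.Set.contains] at hc ⊢; exact hc)]
        simp only [List.reverse_cons]
        rw [ih (PySem.Set.add s x)]
        rw [dedup_append_singleton]
        congr 1
        rw [List.filter_reverse, List.filter_filter]
        congr 2
        apply List.filter_congr
        intro y _
        rw [contains_add, Bool.not_or, Bool.and_comm]

theorem rowAlt_eq (row : List Int) : rowAlt row = erasePairs row := by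
  have hr : rowAlt row
      = (((row.filter (fun x => PySem.Int.mod
            ((row.foldl (fun d x => d.insert x (d.getD x 0 + 1))
              PySem.Dict.empty).getD x 0) 2 == 1)).reverse).foldl
          (fun (p : PySem.Set Int × List Int) x =>
            if PySem.Set.contains p.1 x then p else (PySem.Set.add p.1 x, p.2 ++ [x]))
          (PySem.Set.empty, [])).2.reverse := rfl
  rw [hr, kf_foldl]
  simp only [List.nil_append]
  rw [kf_reverse]
  have hcontains : ∀ y : Int, (!PySem.Set.contains PySem.Set.empty y) = true := by
    intro y; simp [PySem.Set.contains, PySem.Set.empty]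
  rw [List.filter_congr (fun y _ => hcontains y), List.filter_true, List.reverse_reverse]
  have hcnt : ∀ x : Int,
      ((row.foldl (fun d x => d.insert x (d.getD x 0 + 1)) PySem.Dict.empty).getD x 0)
        = (row.count x : Int) := by
    intro x
    rw [PySem.Dict.getD_foldl_insert_add_one]
    simp
  have hpred : ∀ x ∈ row,
      (PySem.Int.mod
        ((row.foldl (fun d x => d.insert x (d.getD x 0 + 1)) PySem.Dict.empty).getD x 0)
        2 == 1) = (row.count x % 2 == 1) := by
    intro x _
    rw [hcnt x]
    have hmod : PySem.Int.mod ((row.count x : Nat) : Int) 2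
        = ((row.count x % 2 : Nat) : Int) := by
      exact_mod_cast PySem.Int.mod_natCast (row.count x) 2
    rw [hmod]
    rcases Nat.mod_two_eq_zero_or_one (row.count x) with h01 | h01 <;> simp [h01]
  rw [List.filter_congr hpred, erasePairs_eq_dedup]

-- ===== VERDICT (by name: the statement is the Claim_ definition above) =====
theorem lst_xor_spec : Claim_equal_lst_xor := by
  intro list0 _
  unfold Spec_lst_xor lst_xor lst_xor_alt
  apply List.map_congr_left
  intro l _
  rw [innerA_eq_erasePairs, rowAlt_eq]
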